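-- pv_equiv track=rewrite | github.com/KingSlayer2K1/2511CS15_CS5105_2025 | tut_01/tut_01.py | uniform_counts_sorted
-- ===== SOURCE A (Python) =====
-- from collections import defaultdict, deque
--
-- def uniform_counts_sorted(branch_map, k):
--     """
--     Distribute each branch's students across groups proportionally.
--     Branches processed in descending order (largest first) so max branch
--     shows up higher in group tables.
--     Returns list of dicts (per group) branch->count.
--     """
--     groups = [defaultdict(int) for _ in range(k)]
--     # sort branches by descending size
--     sorted_branches = sorted(branch_map.items(), key=lambda x: len(x[1]), reverse=True)
--     for branch, students in sorted_branches:
--         n = len(students)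
--         base = n // k
--         rem = n % k
--         idx = 0
--         for g in range(k):
--             take = base + (1 if g < rem else 0)  # distribute remainders to earlier groups
--             if take:
--                 groups[g][branch] += take
--                 idx += take
--     return groups
-- ===== SOURCE B (Python) =====
-- from collections import defaultdict
--
-- def uniform_counts_sorted(branch_map, k):
--     """Same distribution, but deal students round-robin instead of
--     computing base/remainder counts per group."""
--     groups = [defaultdict(int) for _ in range(k)]
--     if not groups:
--         return groups
--     for branch, students in sorted(branch_map.items(), key=lambda x: len(x[1]), reverse=True):
--         for i in range(len(students)):
--             groups[i % k][branch] += 1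
--     return groups
-- ===== Notes on version B (the rewrite author's own statement) =====
-- stated objective: faster
-- what changed: Instead of computing base = n//k and a remainder and looping over all k groups for every branch, B deals each branch's students one at a time round-robin (groups[i % k][branch] += 1), with an early return when there are no groups, so per-branch work is O(#students) instead of O(k).
-- crash fix: When k == 0 and branch_map is non-empty, A raises ZeroDivisionError (n // 0, even for an empty branch); B returns the empty list of groups. — e.g. on uniform_counts_sorted([("A", [])], 0): A raises ZeroDivisionError, B returns []
import Mathlib
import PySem

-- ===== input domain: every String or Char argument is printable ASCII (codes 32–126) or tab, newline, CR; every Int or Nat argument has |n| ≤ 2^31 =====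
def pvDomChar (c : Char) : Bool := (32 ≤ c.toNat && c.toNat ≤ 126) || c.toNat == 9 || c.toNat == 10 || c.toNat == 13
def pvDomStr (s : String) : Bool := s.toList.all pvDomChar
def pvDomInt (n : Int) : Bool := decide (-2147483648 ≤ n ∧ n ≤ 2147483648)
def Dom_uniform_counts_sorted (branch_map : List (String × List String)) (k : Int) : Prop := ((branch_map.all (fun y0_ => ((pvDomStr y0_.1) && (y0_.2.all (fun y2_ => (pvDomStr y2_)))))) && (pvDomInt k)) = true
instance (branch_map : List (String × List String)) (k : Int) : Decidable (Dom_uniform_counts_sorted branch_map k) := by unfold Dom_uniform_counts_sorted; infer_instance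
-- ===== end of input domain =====

-- B replaces A's per-group base/remainder arithmetic by dealing each branch's students
-- round-robin over the groups (objective: alternative); return values proved equal wherever A returns.

-- ===== PORT A =====
def uniform_counts_sorted (branch_map : List (String × List String)) (k : Int) : List (List (String × Int)) :=
  let groups : List (PySem.Dict String Int) := (PySem.List.pyRange 0 k).map (fun _ => PySem.Dict.empty)
  let sorted_branches := PySem.List.sorted branch_map (fun x => (x.2.length : Int)) true
  let groups := sorted_branches.foldl (fun gs bs =>
    let n : Int := (bs.2.length : Int)
    let base := PySem.Int.floordiv n k
    let rem := PySem.Int.mod n k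
    ((PySem.List.pyRange 0 k).foldl (fun s g =>
      let take := base + (if g < rem then (1 : Int) else 0)
      if take ≠ 0 then
        (s.1.modify g.toNat (fun d => PySem.Dict.modify d bs.1 0 (· + take)), s.2 + take)
      else s) (gs, (0 : Int))).1) groups
  groups.map (·.items)

-- ===== PORT B =====
def uniform_counts_sorted_alt (branch_map : List (String × List String)) (k : Int) : List (List (String × Int)) :=
  let groups : List (PySem.Dict String Int) := (PySem.List.pyRange 0 k).map (fun _ => PySem.Dict.empty)
  if groups.isEmpty then groups.map (·.items) else
    let groups := (PySem.List.sorted branch_map (fun x => (x.2.length : Int)) true).foldl (fun gs bs =>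
      (PySem.List.pyRange 0 (bs.2.length : Int)).foldl (fun gs2 i =>
        gs2.modify (PySem.Int.mod i k).toNat (fun d => PySem.Dict.modify d bs.1 0 (· + 1))) gs) groups
    groups.map (·.items)

-- ===== PRECONDITION & SPEC =====
-- Pre_ excludes exactly the inputs on which A raises ZeroDivisionError: k == 0 with a non-empty branch_map.
def Pre_uniform_counts_sorted (branch_map : List (String × List String)) (k : Int) : Prop :=
  k ≠ 0 ∨ branch_map = []
instance (branch_map : List (String × List String)) (k : Int) : Decidable (Pre_uniform_counts_sorted branch_map k) := by unfold Pre_uniform_counts_sorted; infer_instance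

def pvWitness_uniform_counts_sorted : (List (String × List String)) × Int :=
  ([("CS", ["a", "b", "c"]), ("EE", ["d"])], 2)

-- When k == 0 and branch_map is non-empty, A raises ZeroDivisionError (n // 0, even for an empty branch); B returns the empty list of groups.
def Raises_uniform_counts_sorted (branch_map : List (String × List String)) (k : Int) : Prop :=
  k = 0 ∧ branch_map ≠ []
instance (branch_map : List (String × List String)) (k : Int) : Decidable (Raises_uniform_counts_sorted branch_map k) := by unfold Raises_uniform_counts_sorted; infer_instance
def pvRaiseWitness_uniform_counts_sorted : (List (String × List String)) × Int := ([("A", [])], 0)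
def pvRaiseWitnessOut_uniform_counts_sorted : List (List (String × Int)) := []

def Spec_uniform_counts_sorted (branch_map : List (String × List String)) (k : Int) (out : List (List (String × Int))) : Prop := out = uniform_counts_sorted_alt branch_map k
instance (branch_map : List (String × List String)) (k : Int) (out : List (List (String × Int))) : Decidable (Spec_uniform_counts_sorted branch_map k out) := by unfold Spec_uniform_counts_sorted; infer_instance

-- ===== CLAIM (what is proved, stated in full; the proofs are below) =====
def Claim_equal_uniform_counts_sorted : Prop := ∀ (branch_map : List (String × List String)) (k : Int), Dom_uniform_counts_sorted branch_map k → Pre_uniform_counts_sorted branch_map k → Spec_uniform_counts_sorted branch_map k (uniform_counts_sorted branch_map k)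

def Claim_raises_uniform_counts_sorted : Prop := (∀ (branch_map : List (String × List String)) (k : Int), Dom_uniform_counts_sorted branch_map k → Raises_uniform_counts_sorted branch_map k → ¬ Pre_uniform_counts_sorted branch_map k) ∧ (Dom_uniform_counts_sorted (pvRaiseWitness_uniform_counts_sorted.1) (pvRaiseWitness_uniform_counts_sorted.2) ∧ Raises_uniform_counts_sorted (pvRaiseWitness_uniform_counts_sorted.1) (pvRaiseWitness_uniform_counts_sorted.2) ∧ uniform_counts_sorted_alt (pvRaiseWitness_uniform_counts_sorted.1) (pvRaiseWitness_uniform_counts_sorted.2) = pvRaiseWitnessOut_uniform_counts_sorted)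

-- ===== LEMMAS AND PROOFS =====

-- the common closed form of what one branch b does to group g: add c students of b (untouched if c = 0)
def pvBump (c : Nat) (b : String) (d : PySem.Dict String Int) : PySem.Dict String Int :=
  if c = 0 then d else PySem.Dict.modify d b 0 (· + (c : Int))

-- adding one more student of branch b to a group's dict
theorem pv_bump_succ (b : String) (c : Nat) (d : PySem.Dict String Int) :
    PySem.Dict.modify (pvBump c b d) b 0 (· + 1) = pvBump (c + 1) b d := by
  cases c with
  | zero => simp [pvBump]
  | succ m =>
    simp only [pvBump, if_neg (Nat.succ_ne_zero m), if_neg (Nat.succ_ne_zero (m+1)),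
      PySem.Dict.modify, PySem.Dict.insert_insert_self, PySem.Dict.getD_insert_self]
    congr 1
    push_cast
    ring

-- modifying one entry of a mapIdx result
theorem pv_modify_mapIdx {D : Type} (t : Nat → D → D) (j : Nat) (f : D → D) (gs : List D) :
    (gs.mapIdx t).modify j f = gs.mapIdx (fun i d => if i = j then f (t i d) else t i d) := by
  apply List.ext_getElem
  · simp
  · intro i h1 h2
    simp [List.getElem_modify, List.getElem_mapIdx]
    split_ifs with h h' h' <;> simp_all

-- per-group share of a branch after one more round-robin student
theorem pv_succ_count (K n g : Nat) (hK : 0 < K) (hg : g < K) :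
    (n + 1) / K + (if g < (n + 1) % K then 1 else 0)
    = (n / K + if g < n % K then 1 else 0) + (if g = n % K then 1 else 0) := by
  have hd := Nat.div_add_mod n K
  have hr : n % K < K := Nat.mod_lt _ hK
  by_cases hc : n % K + 1 < K
  · have h1 : (n + 1) / K = n / K := by
      conv_lhs => rw [← hd]
      rw [Nat.add_assoc, Nat.mul_add_div hK]
      simp [Nat.div_eq_of_lt hc]
    have h2 : (n + 1) % K = n % K + 1 := by
      conv_lhs => rw [← hd]
      rw [Nat.add_assoc, Nat.mul_add_mod, Nat.mod_eq_of_lt hc]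
    rw [h1, h2]; split_ifs <;> omega
  · have hke : n % K + 1 = K := by omega
    have h1 : (n + 1) / K = n / K + 1 := by
      conv_lhs => rw [← hd]
      rw [Nat.add_assoc, hke, Nat.mul_add_div hK, Nat.div_self hK]
    have h2 : (n + 1) % K = 0 := by
      conv_lhs => rw [← hd]
      rw [Nat.add_assoc, hke, Nat.mul_add_mod, Nat.mod_self]
    rw [h1, h2]; split_ifs <;> omega

-- B's round-robin pass over one branch (Nat-range form) equals the closed form
theorem pv_bpass_core (K : Nat) (hK : 0 < K) (b : String) :
    ∀ (n : Nat) (gs : List (PySem.Dict String Int)), gs.length = K →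
    (List.range n).foldl (fun gs2 m => gs2.modify (m % K) (fun d => PySem.Dict.modify d b 0 (· + 1))) gs
    = gs.mapIdx (fun g d => pvBump (n / K + if g < n % K then 1 else 0) b d) := by
  intro n
  induction n with
  | zero =>
    intro gs h
    simp only [List.range_zero, List.foldl_nil, Nat.zero_div, Nat.zero_mod]
    symm
    apply List.ext_getElem
    · simp
    · intro i h1 h2
      simp [pvBump]
  | succ n ih =>
    intro gs h
    rw [List.range_succ, List.foldl_append, ih gs h]
    simp only [List.foldl_cons, List.foldl_nil]
    rw [pv_modify_mapIdx]
    apply List.ext_getElem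
    · simp
    · intro i h1 h2
      have hg : i < K := by simpa [h] using (by simpa using h1 : i < gs.length)
      simp only [List.getElem_mapIdx]
      rw [pv_succ_count K n i hK hg]
      by_cases hij : i = n % K
      · rw [if_pos hij, pv_bump_succ, if_pos hij]
      · rw [if_neg hij, if_neg hij]
        simp

-- A's inner loop ignores its dead `idx` accumulator
theorem pv_drop_idx (base rem : Int) (b : String) (l : List Int) :
    ∀ (gs : List (PySem.Dict String Int)) (idx : Int),
    (l.foldl (fun s g =>
        let take := base + (if g < rem then (1 : Int) else 0)
        if take ≠ 0 then
          (s.1.modify g.toNat (fun d => PySem.Dict.modify d b 0 (· + take)), s.2 + take)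
        else s) (gs, idx)).1
    = l.foldl (fun gs g =>
        let take := base + (if g < rem then (1 : Int) else 0)
        if take ≠ 0 then gs.modify g.toNat (fun d => PySem.Dict.modify d b 0 (· + take)) else gs) gs := by
  induction l with
  | nil => intro gs idx; rfl
  | cons x t ih =>
    intro gs idx
    simp only [List.foldl_cons]
    split_ifs with h <;> simp only [ih]

theorem pv_foldl_modify_cons {D : Type} (g : Nat → D → D) (l : List Nat) :
    ∀ (x : D) (xs : List D),
    l.foldl (fun gs m => gs.modify (m + 1) (g m)) (x :: xs)
    = x :: l.foldl (fun gs m => gs.modify m (g m)) xs := by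
  induction l with
  | nil => intro x xs; rfl
  | cons a t ih => intro x xs; simp only [List.foldl_cons, List.modify_succ_cons, ih]

-- an index-by-index modification pass over `range length` is `mapIdx`
theorem pv_foldl_modify_range {D : Type} :
    ∀ (gs : List D) (f : Nat → D → D), (List.range gs.length).foldl (fun gs m => gs.modify m (f m)) gs
      = gs.mapIdx (fun i d => f i d) := by
  intro gs
  induction gs with
  | nil => intro f; rfl
  | cons d rest ih =>
    intro f
    rw [List.length_cons, List.range_succ_eq_map]
    simp only [List.foldl_cons, List.foldl_map, List.modify_zero_cons]
    have : ∀ (l : List Nat), l.foldl (fun gs m => gs.modify (Nat.succ m) (f (Nat.succ m))) (f 0 d :: rest)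
        = (f 0 d) :: l.foldl (fun gs m => gs.modify m (f (m+1))) rest := by
      intro l; exact pv_foldl_modify_cons (fun m => f (m+1)) l (f 0 d) rest
    rw [this, ih (fun m => f (m+1)), List.mapIdx_cons]

-- A's per-branch pass (with its dead pair state) equals the closed form
theorem pv_apass (K : Nat) (b : String) (n : Nat)
    (gs : List (PySem.Dict String Int)) (h : gs.length = K) :
    ((PySem.List.pyRange 0 (K : Int)).foldl (fun s g =>
        let take := PySem.Int.floordiv (n : Int) (K : Int) + (if g < PySem.Int.mod (n : Int) (K : Int) then (1 : Int) else 0)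
        if take ≠ 0 then
          (s.1.modify g.toNat (fun d => PySem.Dict.modify d b 0 (· + take)), s.2 + take)
        else s) (gs, (0 : Int))).1
    = gs.mapIdx (fun g d => pvBump (n / K + if g < n % K then 1 else 0) b d) := by
  rw [pv_drop_idx]
  rw [PySem.List.pyRange_zero_nat, List.foldl_map]
  have hstep : (fun (gs : List (PySem.Dict String Int)) (m : Nat) =>
      let take := PySem.Int.floordiv (n : Int) (K : Int) + (if ((m : Int)) < PySem.Int.mod (n : Int) (K : Int) then (1 : Int) else 0)
      if take ≠ 0 then gs.modify (m : Int).toNat (fun d => PySem.Dict.modify d b 0 (· + take)) else gs)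
      = (fun gs m => gs.modify m (fun d => pvBump (n / K + if m < n % K then 1 else 0) b d)) := by
    funext gs m
    have hcast : PySem.Int.floordiv (n : Int) (K : Int) + (if ((m : Int)) < PySem.Int.mod (n : Int) (K : Int) then (1 : Int) else 0)
        = ((n / K + if m < n % K then 1 else 0 : Nat) : Int) := by
      rw [PySem.Int.floordiv_natCast, PySem.Int.mod_natCast]
      simp only [Nat.cast_add, Nat.cast_ite, Nat.cast_one, Nat.cast_zero, Nat.cast_lt]
    simp only [hcast]
    by_cases hc : (n / K + if m < n % K then 1 else 0) = 0
    · rw [hc]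
      simp only [Nat.cast_zero, ne_eq, not_true_eq_false, if_false]
      simp [pvBump]
      exact (List.modify_id m gs).symm
    · have : ((n / K + if m < n % K then 1 else 0 : Nat) : Int) ≠ 0 := by exact_mod_cast hc
      simp only [if_pos this, Int.toNat_natCast, pvBump, if_neg hc]
  rw [hstep, ← h, pv_foldl_modify_range]

-- B's per-branch pass equals the same closed form
theorem pv_bpass (K : Nat) (hK : 0 < K) (b : String) (n : Nat)
    (gs : List (PySem.Dict String Int)) (h : gs.length = K) :
    (PySem.List.pyRange 0 (n : Int)).foldl (fun gs2 i =>
        gs2.modify (PySem.Int.mod i (K : Int)).toNat (fun d => PySem.Dict.modify d b 0 (· + 1))) gs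
    = gs.mapIdx (fun g d => pvBump (n / K + if g < n % K then 1 else 0) b d) := by
  rw [PySem.List.pyRange_zero_nat, List.foldl_map]
  have hstep : (fun (gs2 : List (PySem.Dict String Int)) (m : Nat) =>
      gs2.modify (PySem.Int.mod (m : Int) (K : Int)).toNat (fun d => PySem.Dict.modify d b 0 (· + 1)))
      = (fun gs2 m => gs2.modify (m % K) (fun d => PySem.Dict.modify d b 0 (· + 1))) := by
    funext gs2 m
    rw [PySem.Int.mod_natCast, Int.toNat_natCast]
  rw [hstep]
  exact pv_bpass_core K hK b n gs h

-- with k = K > 0 groups, the two outer loops over the sorted branches agree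
theorem pv_main_pos (K : Nat) (hK : 0 < K) (l : List (String × List String)) :
    ∀ (gs : List (PySem.Dict String Int)), gs.length = K →
    l.foldl (fun gs bs =>
      ((PySem.List.pyRange 0 (K : Int)).foldl (fun s g =>
        let take := PySem.Int.floordiv (bs.2.length : Int) (K : Int) + (if g < PySem.Int.mod (bs.2.length : Int) (K : Int) then (1 : Int) else 0)
        if take ≠ 0 then
          (s.1.modify g.toNat (fun d => PySem.Dict.modify d bs.1 0 (· + take)), s.2 + take)
        else s) (gs, (0 : Int))).1) gs
    = l.foldl (fun gs bs =>
      (PySem.List.pyRange 0 (bs.2.length : Int)).foldl (fun gs2 i =>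
        gs2.modify (PySem.Int.mod i (K : Int)).toNat (fun d => PySem.Dict.modify d bs.1 0 (· + 1))) gs) gs := by
  induction l with
  | nil => intro gs h; rfl
  | cons bs t ih =>
    intro gs h
    simp only [List.foldl_cons]
    rw [pv_apass K bs.1 bs.2.length gs h, pv_bpass K hK bs.1 bs.2.length gs h]
    exact ih _ (by simp [h])

-- ===== VERDICT (by name: the statement is the Claim_ definition above) =====
theorem uniform_counts_sorted_raises : Claim_raises_uniform_counts_sorted := by
  unfold Claim_raises_uniform_counts_sorted
  constructor
  · intro bm k _ hr hp
    rcases hr with ⟨hk, hbm⟩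
    rcases hp with h | h
    · exact h hk
    · exact hbm h
  · exact ⟨by decide, by decide, by decide⟩

theorem uniform_counts_sorted_spec : Claim_equal_uniform_counts_sorted := by
  intro bm k _dom hpre
  unfold Spec_uniform_counts_sorted
  rcases lt_trichotomy k 0 with hk | hk | hk
  · -- k < 0 : no groups on either side
    have hnil : PySem.List.pyRange 0 k = [] := PySem.List.pyRange_one_eq_nil hk.le
    simp only [uniform_counts_sorted, uniform_counts_sorted_alt, hnil, List.map_nil,
      List.foldl_nil, List.isEmpty_nil, if_true]
    rw [PySem.List.foldl_ignore]
    rfl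
  · -- k = 0 : Pre_ forces branch_map = []
    subst hk
    have hbm : bm = [] := by
      by_contra hbm
      exact uniform_counts_sorted_raises.1 bm 0 _dom ⟨rfl, hbm⟩ hpre
    subst hbm
    simp [uniform_counts_sorted, uniform_counts_sorted_alt,
      (PySem.List.sorted_eq_nil_iff ([] : List (String × List String)) _ true).mpr rfl]
  · -- k > 0 : the main case
    obtain ⟨K, rfl⟩ : ∃ K : Nat, k = (K : Int) := ⟨k.toNat, (Int.toNat_of_nonneg hk.le).symm⟩
    have hK : 0 < K := by exact_mod_cast hk
    have hlen : ((PySem.List.pyRange 0 (K : Int)).map (fun _ => (PySem.Dict.empty : PySem.Dict String Int))).length = K := by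
      simp [PySem.List.length_pyRange_one]
    have hne : ((PySem.List.pyRange 0 (K : Int)).map (fun _ => (PySem.Dict.empty : PySem.Dict String Int))).isEmpty = false := by
      rw [List.isEmpty_eq_false_iff, ← List.length_pos_iff, hlen]; exact hK
    simp only [uniform_counts_sorted, uniform_counts_sorted_alt, hne, Bool.false_eq_true, if_false]
    rw [pv_main_pos K hK _ _ hlen]
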